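-- pv_equiv track=rewrite | github.com/meneedstea/maze_solver | CEP.py | remove_overlap
-- ===== SOURCE A (Python) =====
-- def remove_overlap(path: list):
--     new_path = [path[0]]
--     i = 0
--     while i < len(path) - 1:
--         i += 1
--         if path[i] in path[i + 1:]:
--             i = path.index(path[i], i + 1)
--         new_path.append(path[i])
--     return new_path
-- ===== SOURCE B (Python) =====
-- def remove_overlap(path: list):
--     # Right-to-left DP: for every start index j compute the whole shortcut output
--     # for the suffix, as shared cons cells; the answer is path[0] plus the j=1 entry.
--     n = len(path)
--     table = [None] * (n + 1)      # table[j] = cons chain of the output from index j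
--     nxt = {}                      # value -> smallest index > current j holding it
--     for j in range(n - 1, 0, -1):
--         v = path[j]
--         k = nxt.get(v)
--         t = k + 1 if k is not None else j + 1
--         table[j] = (v, table[t])
--         nxt[v] = j
--     out = [path[0]]
--     cell = table[1] if n > 1 else None
--     while cell is not None:
--         out.append(cell[0])
--         cell = cell[1]
--     return out
-- ===== Notes on version B (the rewrite author's own statement) =====
-- stated objective: faster
-- what changed: Replaces A's forward walk with O(n) slice-membership/.index scans per step by a right-to-left dynamic programme that computes, for every suffix start index, the entire shortcut output as shared cons cells (plus a last-seen dict for next occurrences), then reads off the answer for index 1.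
import Mathlib
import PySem

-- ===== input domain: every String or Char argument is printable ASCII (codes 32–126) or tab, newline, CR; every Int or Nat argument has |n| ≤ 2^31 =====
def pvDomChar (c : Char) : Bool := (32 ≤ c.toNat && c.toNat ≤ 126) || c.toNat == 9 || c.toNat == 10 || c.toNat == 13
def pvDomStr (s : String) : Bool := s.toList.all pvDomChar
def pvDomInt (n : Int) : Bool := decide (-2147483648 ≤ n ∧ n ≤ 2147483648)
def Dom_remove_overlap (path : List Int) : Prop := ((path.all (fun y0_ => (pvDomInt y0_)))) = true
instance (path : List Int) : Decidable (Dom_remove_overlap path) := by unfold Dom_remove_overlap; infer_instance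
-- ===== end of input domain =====

-- B replaces A's forward walk with per-step tail scans by a right-to-left dynamic
-- programme that computes, for every suffix start, the whole shortcut output as a
-- shared cons chain (objective: faster).

-- ===== PORT A =====
-- A's while loop; fuel = path.length suffices because i strictly increases each iteration.
def removeOverlapLoopA (path : List Int) : Nat → Nat → List Int → List Int
  | 0, _, acc => acc.reverse
  | fuel + 1, i, acc =>
    if i < path.length - 1 then
      let i1 := i + 1
      let v := PySem.List.pyGetD path (i1 : Int) 0
      -- `path[i] in path[i+1:]` / `path.index(path[i], i+1)`: one scan of the tail slice
      let tail := PySem.List.slice path (some ((i1 + 1 : Nat) : Int)) none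
      let i2 := match PySem.List.index? tail v with
        | some k => i1 + 1 + k
        | none => i1
      removeOverlapLoopA path fuel i2 (PySem.List.pyGetD path (i2 : Int) 0 :: acc)
    else acc.reverse

def remove_overlap (path : List Int) : List Int :=
  removeOverlapLoopA path path.length 0 [PySem.List.pyGetD path 0 0]

-- ===== PORT B =====
-- Source B's `for j in range(n-1, 0, -1)` building table[j] = (path[j], table[t]) and the
-- next-occurrence dict, ported as structural recursion from the right over the suffix
-- path[1:]; a Lean list literally is Source B's cons cell (value, rest), with [] = None.
def buildTbl : List Int → Nat → PySem.Dict Int Nat × List (List Int)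
  | [], _ => (PySem.Dict.empty, [[]])
  | v :: rtl, j =>
    let p := buildTbl rtl (j + 1)
    let t := match p.1.get? v with
      | some k => k + 1
      | none => j + 1
    (p.1.insert v j, (v :: p.2.getD (t - (j + 1)) []) :: p.2)

-- Source B's final `while cell is not None` loop copying the chain into `out`
def chainToList : List Int → List Int
  | [] => []
  | v :: rest => v :: chainToList rest

def remove_overlap_alt (path : List Int) : List Int :=
  PySem.List.pyGetD path 0 0 :: chainToList ((buildTbl (path.drop 1) 1).2.getD 0 [])

-- ===== PRECONDITION & SPEC =====
-- Pre_ excludes only the empty list, on which both A and B raise IndexError (path[0]).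
def Pre_remove_overlap (path : List Int) : Prop := path ≠ []
instance (path : List Int) : Decidable (Pre_remove_overlap path) := by unfold Pre_remove_overlap; infer_instance
def pvWitness_remove_overlap : List Int := [1, 2, 1, 3]

def Spec_remove_overlap (path : List Int) (out : List Int) : Prop := out = remove_overlap_alt path
instance (path : List Int) (out : List Int) : Decidable (Spec_remove_overlap path out) := by unfold Spec_remove_overlap; infer_instance

-- ===== CLAIM =====
def Claim_equal_remove_overlap : Prop := ∀ (path : List Int), Dom_remove_overlap path → Pre_remove_overlap path → Spec_remove_overlap path (remove_overlap path)

-- ===== LEMMAS AND PROOFS =====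

-- the index A/B continue from after handling position j (some k = offset of the next
-- occurrence of path[j] in path[j+1:])
def jumpTarget (j : Nat) : Option Nat → Nat
  | some k => j + 1 + k + 1
  | none => j + 1

theorem jumpTarget_gt (j : Nat) (o : Option Nat) : j < jumpTarget j o := by
  cases o <;> simp [jumpTarget] <;> omega

-- reference function: the output emitted from position j onwards
def Tw (path : List Int) (j : Nat) : List Int :=
  if _h : j < path.length then
    path.getD j 0 ::
      Tw path (jumpTarget j (PySem.List.index? (path.drop (j + 1)) (path.getD j 0)))
  else []
termination_by path.length - j
decreasing_by
  have := jumpTarget_gt j (PySem.List.index? (path.drop (j + 1)) (path.getD j 0))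
  omega

theorem index?_getD (l : List Int) (v : Int) (k : Nat)
    (h : PySem.List.index? l v = some k) : l.getD k 0 = v := by
  obtain ⟨hk, hv, -⟩ := PySem.List.getElem_of_index?_eq_some h
  simp [List.getD_eq_getElem?_getD, List.getElem?_eq_getElem hk, hv]

theorem index?_lt (l : List Int) (v : Int) (k : Nat)
    (h : PySem.List.index? l v = some k) : k < l.length := by
  obtain ⟨hk, -, -⟩ := PySem.List.getElem_of_index?_eq_some h
  exact hk

theorem getD_drop (l : List Int) (n m : Nat) :
    (l.drop n).getD m 0 = l.getD (n + m) 0 := by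
  simp [List.getD_eq_getElem?_getD, List.getElem?_drop]

-- A's loop from state i emits exactly Tw path (i+1)
theorem loopA_eq (path : List Int) (fuel : Nat) : ∀ (i : Nat) (acc : List Int),
    path.length - 1 - i ≤ fuel →
    removeOverlapLoopA path fuel i acc = acc.reverse ++ Tw path (i + 1) := by
  induction fuel with
  | zero =>
    intro i acc hf
    have hn : ¬ (i + 1 < path.length) := by omega
    rw [removeOverlapLoopA, Tw, dif_neg hn, List.append_nil]
  | succ fuel ih =>
    intro i acc hf
    rw [removeOverlapLoopA]
    split
    · next h =>
      have hi1 : i + 1 < path.length := by omega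
      simp only [PySem.List.pyGetD_natCast, PySem.List.slice_from_natCast]
      rw [Tw, dif_pos hi1]
      cases hix : PySem.List.index? (path.drop (i + 1 + 1)) (path.getD (i + 1) 0) with
      | none =>
        rw [ih (i + 1) _ (by omega)]
        simp [jumpTarget]
      | some k =>
        have hval : path.getD (i + 1 + 1 + k) 0 = path.getD (i + 1) 0 := by
          rw [← getD_drop path (i + 1 + 1) k]
          exact index?_getD _ _ _ hix
        rw [hval, ih (i + 1 + 1 + k) _ (by omega)]
        simp [jumpTarget]
    · next h =>
      have hn : ¬ (i + 1 < path.length) := by omega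
      rw [Tw, dif_neg hn, List.append_nil]

-- the dict threaded right-to-left maps each value to its first index (≥ j) in the suffix
theorem buildTbl_get? (rest : List Int) (j : Nat) (v : Int) :
    ((buildTbl rest j).1).get? v = (PySem.List.index? rest v).map (fun k => j + k) := by
  induction rest generalizing j with
  | nil => simp [buildTbl, PySem.Dict.get?_empty, PySem.List.index?]
  | cons x rtl ih =>
    by_cases hx : x = v
    · subst hx
      simp [buildTbl, PySem.Dict.get?_insert_self, List.idxOf?, List.findIdx?_cons]
    · rw [PySem.List.index?_cons_of_ne rtl hx]
      have h2 : (buildTbl (x :: rtl) j).1 = ((buildTbl rtl (j + 1)).1).insert x j := rfl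
      rw [h2, PySem.Dict.get?_insert_of_ne _ _ (Ne.symm hx), ih (j + 1)]
      cases PySem.List.index? rtl v <;> simp <;> try omega

-- every table entry is the reference output for its absolute index
theorem buildTbl_tbl (path : List Int) : ∀ (rest : List Int) (j : Nat),
    rest = path.drop j → ∀ (m : Nat), m ≤ rest.length →
    (buildTbl rest j).2.getD m [] = Tw path (j + m) := by
  intro rest
  induction rest with
  | nil =>
    intro j hr m hm
    have hm0 : m = 0 := Nat.le_zero.mp (by simpa using hm)
    subst hm0
    have hn : path.length ≤ j := List.drop_eq_nil_iff.mp hr.symm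
    rw [Tw, dif_neg (by omega)]
    rfl
  | cons v rtl ih =>
    intro j hr m hm
    have hlen : rtl.length + 1 = path.length - j := by
      have := congrArg List.length hr
      simpa using this
    have hj : j < path.length := by omega
    have hrtl : rtl = path.drop (j + 1) := by
      have : path.drop (j + 1) = (path.drop j).drop 1 := by
        rw [List.drop_drop]
      rw [this, ← hr]
      rfl
    have hv : path.getD j 0 = v := by
      have h0 : (path.drop j).getD 0 0 = path.getD (j + 0) 0 := getD_drop path j 0
      rw [← hr] at h0
      simpa using h0.symm
    cases m with
    | zero =>
      have hcell : (buildTbl (v :: rtl) j).2.getD 0 []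
          = v :: (buildTbl rtl (j + 1)).2.getD
              ((match ((buildTbl rtl (j + 1)).1).get? v with
                | some k => k + 1
                | none => j + 1) - (j + 1)) [] := rfl
      rw [hcell]
      simp only [Nat.add_zero]
      rw [Tw, dif_pos hj, hv, ← hrtl, buildTbl_get?]
      cases hix : PySem.List.index? rtl v with
      | none =>
        simp only [Option.map_none, Nat.sub_self]
        rw [ih (j + 1) hrtl 0 (by omega)]
        simp [jumpTarget]
      | some k =>
        simp only [Option.map_some]
        have hk : k < rtl.length := index?_lt _ _ _ hix
        have harg : (j + 1 + k + 1) - (j + 1) = k + 1 := by omega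
        have he : j + 1 + (k + 1) = j + 1 + k + 1 := by omega
        rw [harg, ih (j + 1) hrtl (k + 1) (by omega), he]
        simp [jumpTarget]
    | succ m' =>
      have hstep : (buildTbl (v :: rtl) j).2.getD (m' + 1) []
          = (buildTbl rtl (j + 1)).2.getD m' [] := rfl
      rw [hstep, ih (j + 1) hrtl m' (by simpa using hm)]
      congr 1
      omega

theorem chainToList_id (l : List Int) : chainToList l = l := by
  induction l with
  | nil => rfl
  | cons v rest ih => rw [chainToList, ih]

-- ===== VERDICT =====
theorem remove_overlap_spec : Claim_equal_remove_overlap := by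
  intro path _ hpre
  unfold Spec_remove_overlap remove_overlap remove_overlap_alt
  rw [loopA_eq path path.length 0 _ (by omega), chainToList_id,
    buildTbl_tbl path (path.drop 1) 1 rfl 0 (by omega)]
  simp
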